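-- pv_equiv track=rewrite | github.com/ChrisHayduk/nanoFold-Competition | scripts/preprocess.py | _pairs_from_aligned_strings
-- ===== SOURCE A (Python) =====
-- from typing import Dict, List, Optional, Sequence, Tuple
--
-- def _pairs_from_aligned_strings(query_aligned: str, template_aligned: str) -> Tuple[List[Tuple[int, int]], int]:
--     if len(query_aligned) != len(template_aligned):
--         raise ValueError("Aligned query/template strings must have the same length.")
--     pairs: List[Tuple[int, int]] = []
--     matches = 0
--     q_idx = 0
--     t_idx = 0
--     for q_char, t_char in zip(query_aligned, template_aligned, strict=True):
--         q_has = q_char != "-"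
--         t_has = t_char != "-"
--         if q_has and t_has:
--             pairs.append((q_idx, t_idx))
--             if q_char.upper() == t_char.upper():
--                 matches += 1
--         if q_has:
--             q_idx += 1
--         if t_has:
--             t_idx += 1
--     return pairs, matches
-- ===== SOURCE B (Python) =====
-- def _pairs_from_aligned_strings(query_aligned: str, template_aligned: str):
--     if len(query_aligned) != len(template_aligned):
--         raise ValueError("Aligned query/template strings must have the same length.")
--     # Prefix-position tables: q_pos[i] = number of non-gap query chars before column i.
--     q_pos = []
--     c = 0
--     for ch in query_aligned:
--         q_pos.append(c)
--         if ch != "-":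
--             c += 1
--     t_pos = []
--     c = 0
--     for ch in template_aligned:
--         t_pos.append(c)
--         if ch != "-":
--             c += 1
--     pairs = []
--     matches = 0
--     for q_char, t_char, qp, tp in zip(query_aligned, template_aligned, q_pos, t_pos):
--         if q_char != "-" and t_char != "-":
--             pairs.append((qp, tp))
--             if q_char.upper() == t_char.upper():
--                 matches += 1
--     return pairs, matches
-- ===== Notes on version B (the rewrite author's own statement) =====
-- stated objective: alternative
-- what changed: B replaces A's two running index counters threaded through one loop by two precomputed prefix-position tables (q_pos/t_pos) built in separate passes, then a combining pass over columns that reads positions from the tables.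
import Mathlib
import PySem

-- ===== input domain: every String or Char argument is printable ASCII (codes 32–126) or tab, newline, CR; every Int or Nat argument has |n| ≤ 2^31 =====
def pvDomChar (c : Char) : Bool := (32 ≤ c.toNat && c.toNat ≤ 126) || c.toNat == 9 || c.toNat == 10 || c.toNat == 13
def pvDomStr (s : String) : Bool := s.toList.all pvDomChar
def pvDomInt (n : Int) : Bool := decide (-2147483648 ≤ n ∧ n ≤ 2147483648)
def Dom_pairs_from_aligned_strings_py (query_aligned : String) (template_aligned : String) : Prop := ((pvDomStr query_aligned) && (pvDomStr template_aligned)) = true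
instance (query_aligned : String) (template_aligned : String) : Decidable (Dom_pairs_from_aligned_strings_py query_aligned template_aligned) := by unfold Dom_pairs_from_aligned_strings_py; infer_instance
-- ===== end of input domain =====

-- B builds two prefix-position tables in separate passes and combines them in one pass,
-- instead of A's single loop threading two running index counters (objective: alternative; return-value equivalence).

-- ===== PORT A =====
-- state: (pairs, matches, q_idx, t_idx)
def pvAStep (st : List (Int × Int) × Int × Int × Int) (p : Char × Char) :
    List (Int × Int) × Int × Int × Int :=
  let qHas := p.1 ≠ '-'
  let tHas := p.2 ≠ '-'
  let st1 :=
    if qHas ∧ tHas then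
      (st.1 ++ [(st.2.2.1, st.2.2.2)],
       (if PySem.Chars.upperChar p.1 = PySem.Chars.upperChar p.2 then st.2.1 + 1 else st.2.1),
       st.2.2.1, st.2.2.2)
    else st
  (st1.1, st1.2.1,
   (if qHas then st1.2.2.1 + 1 else st1.2.2.1),
   (if tHas then st1.2.2.2 + 1 else st1.2.2.2))

def pairs_from_aligned_strings_py (query_aligned : String) (template_aligned : String) :
    (List (Int × Int)) × Int :=
  -- the length check raises ValueError in Python; excluded by Pre_
  let st := (query_aligned.toList.zip template_aligned.toList).foldl pvAStep ([], 0, 0, 0)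
  (st.1, st.2.1)

-- ===== PORT B =====
-- prefix table: positions.1 is the table, positions.2 the running count
def pvPrefixTable (s : List Char) : List Int :=
  (s.foldl (fun (st : List Int × Int) ch =>
      (st.1 ++ [st.2], if ch ≠ '-' then st.2 + 1 else st.2)) ([], 0)).1

def pvCombineStep (st : List (Int × Int) × Int) (p : (Char × Char) × (Int × Int)) :
    List (Int × Int) × Int :=
  if p.1.1 ≠ '-' ∧ p.1.2 ≠ '-' then
    (st.1 ++ [(p.2.1, p.2.2)],
     if PySem.Chars.upperChar p.1.1 = PySem.Chars.upperChar p.1.2 then st.2 + 1 else st.2)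
  else st

def pairs_from_aligned_strings_py_alt (query_aligned : String) (template_aligned : String) :
    (List (Int × Int)) × Int :=
  let qPos := pvPrefixTable query_aligned.toList
  let tPos := pvPrefixTable template_aligned.toList
  ((query_aligned.toList.zip template_aligned.toList).zip (qPos.zip tPos)).foldl
    pvCombineStep ([], 0)

-- ===== PRECONDITION & SPEC =====
-- A raises ValueError when the two strings differ in length; exactly those inputs are excluded.
def Pre_pairs_from_aligned_strings_py (query_aligned : String) (template_aligned : String) : Prop :=
  query_aligned.toList.length = template_aligned.toList.length
instance (query_aligned : String) (template_aligned : String) : Decidable (Pre_pairs_from_aligned_strings_py query_aligned template_aligned) := by unfold Pre_pairs_from_aligned_strings_py; infer_instance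
def pvWitness_pairs_from_aligned_strings_py : String × String := ("AG-c", "A-Gc")

def Spec_pairs_from_aligned_strings_py (query_aligned : String) (template_aligned : String) (out : (List (Int × Int)) × Int) : Prop := out = pairs_from_aligned_strings_py_alt query_aligned template_aligned
instance (query_aligned : String) (template_aligned : String) (out : (List (Int × Int)) × Int) : Decidable (Spec_pairs_from_aligned_strings_py query_aligned template_aligned out) := by unfold Spec_pairs_from_aligned_strings_py; infer_instance

-- ===== CLAIM (what is proved, stated in full; the proofs are below) =====
def Claim_equal_pairs_from_aligned_strings_py : Prop := ∀ (query_aligned : String) (template_aligned : String), Dom_pairs_from_aligned_strings_py query_aligned template_aligned → Pre_pairs_from_aligned_strings_py query_aligned template_aligned → Spec_pairs_from_aligned_strings_py query_aligned template_aligned (pairs_from_aligned_strings_py query_aligned template_aligned)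

-- ===== LEMMAS AND PROOFS =====

-- recursive characterisation of the prefix-table fold
def pvPP (c : Int) : List Char → List Int
  | [] => []
  | ch :: rest => c :: pvPP (if ch ≠ '-' then c + 1 else c) rest

lemma pvPrefixTable_aux (s : List Char) : ∀ (acc : List Int) (c : Int),
    (s.foldl (fun (st : List Int × Int) ch =>
      (st.1 ++ [st.2], if ch ≠ '-' then st.2 + 1 else st.2)) (acc, c)).1
    = acc ++ pvPP c s := by
  induction s with
  | nil => intro acc c; simp [pvPP]
  | cons ch rest ih =>
    intro acc c
    simp only [List.foldl, pvPP, ih]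
    simp

lemma pvPrefixTable_eq (s : List Char) : pvPrefixTable s = pvPP 0 s := by
  unfold pvPrefixTable
  simpa using pvPrefixTable_aux s [] 0

-- the main invariant: A's fold from counters (qi, ti) equals B's combining fold
-- over tables pvPP qi / pvPP ti, with accumulators prepended.
lemma pvMain : ∀ (qs ts : List Char) (acc : List (Int × Int)) (m qi ti : Int),
    ((qs.zip ts).foldl pvAStep (acc, m, qi, ti)).1 =
      (((qs.zip ts).zip ((pvPP qi qs).zip (pvPP ti ts))).foldl pvCombineStep (acc, m)).1
    ∧
    ((qs.zip ts).foldl pvAStep (acc, m, qi, ti)).2.1 =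
      (((qs.zip ts).zip ((pvPP qi qs).zip (pvPP ti ts))).foldl pvCombineStep (acc, m)).2 := by
  intro qs
  induction qs with
  | nil => intro ts acc m qi ti; simp [pvPP]
  | cons q qs ih =>
    intro ts acc m qi ti
    cases ts with
    | nil => simp [pvPP]
    | cons t ts =>
      simp only [List.zip_cons_cons, pvPP, List.foldl_cons]
      have h := ih ts
        (if q ≠ '-' ∧ t ≠ '-' then acc ++ [(qi, ti)] else acc)
        (if q ≠ '-' ∧ t ≠ '-' then
            (if PySem.Chars.upperChar q = PySem.Chars.upperChar t then m + 1 else m)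
          else m)
        (if q ≠ '-' then qi + 1 else qi)
        (if t ≠ '-' then ti + 1 else ti)
      by_cases hq : q = '-' <;> by_cases ht : t = '-' <;>
        simpa [pvAStep, pvCombineStep, hq, ht] using h

-- ===== VERDICT (by name: the statement is the Claim_ definition above) =====
theorem pairs_from_aligned_strings_py_spec : Claim_equal_pairs_from_aligned_strings_py := by
  intro q t _ _
  unfold Spec_pairs_from_aligned_strings_py pairs_from_aligned_strings_py
    pairs_from_aligned_strings_py_alt
  rw [pvPrefixTable_eq, pvPrefixTable_eq]
  obtain ⟨h1, h2⟩ := pvMain q.toList t.toList [] 0 0 0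
  exact Prod.ext h1 h2
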